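-- pv_equiv track=rewrite | github.com/PaulLupse/Proiect-Criptografie | pachete/conector/validator.py | _aes128_validation_cypher
-- ===== SOURCE A (Python) =====
-- def _aes128_validation_cypher(message):
--
--     if len(message.replace(" ", "")) % 2 != 0:
--         return f"Mesajul este de lungime invalidă."
--
--     valid_chars = [' ']
--
--     for LOWER_letter in range(97, 103):
--         valid_chars.append(chr(LOWER_letter))
--
--     for digit in range(48, 58):
--         valid_chars.append(chr(digit))
--
--     for i in range(0, len(message)):
--         if message[i] not in valid_chars:
--             return f"Mesajul tău conține caractere invalide: {message[i]}."
--         else: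
--             pass
--
--     return None
-- ===== SOURCE B (Python) =====
-- import re
--
-- def _aes128_validation_cypher(message):
--     if len(message.replace(" ", "")) % 2 != 0:
--         return f"Mesajul este de lungime invalidă."
--     m = re.search(r'[^0-9a-f ]', message)
--     if m:
--         return f"Mesajul tău conține caractere invalide: {m.group()}."
--     return None
-- ===== Notes on version B (the rewrite author's own statement) =====
-- stated objective: idiomatic
-- what changed: B drops A's hand-built valid_chars list and explicit index loop and instead finds the first offending character with a regex search re.search(r'[^0-9a-f ]', message), keeping the identical length guard.
import Mathlib
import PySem

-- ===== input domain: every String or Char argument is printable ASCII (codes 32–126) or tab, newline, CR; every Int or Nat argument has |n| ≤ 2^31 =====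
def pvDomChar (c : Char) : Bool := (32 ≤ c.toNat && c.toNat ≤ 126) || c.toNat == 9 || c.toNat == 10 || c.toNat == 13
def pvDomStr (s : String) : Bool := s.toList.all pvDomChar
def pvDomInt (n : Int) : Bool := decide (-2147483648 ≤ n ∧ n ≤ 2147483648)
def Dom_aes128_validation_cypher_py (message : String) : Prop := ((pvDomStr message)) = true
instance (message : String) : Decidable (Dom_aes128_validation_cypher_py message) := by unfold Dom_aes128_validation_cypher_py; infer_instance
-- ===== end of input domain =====

-- B replaces A's hand-built valid_chars list and index loop by a regex search for the first
-- character outside [0-9a-f ] (objective: idiomatic; equal cost).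

-- ===== PORT A =====
-- f"Mesajul tău conține caractere invalide: {message[i]}."
def pvInvalidMsg (c : Char) : String :=
  "Mesajul tău conține caractere invalide: " ++ String.ofList [c] ++ "."

-- "for i in range(0, len(message)): if message[i] not in valid_chars: return …; else: pass"
def pvLoopA (cs : List Char) (valid : List Char) : List Int → Option String
  | [] => none
  | i :: rest =>
    match PySem.List.pyGet? cs i with
    | none => none   -- unreachable: i ranges over range(len(cs)), always in range
    | some c => if c ∉ valid then some (pvInvalidMsg c) else pvLoopA cs valid rest

-- valid_chars = [' '] + [chr(l) for l in range(97,103)] + [chr(d) for d in range(48,58)]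
def pvValidChars : List Char :=
  (PySem.List.pyRange 48 58 1).foldl (fun acc n => acc ++ [Char.ofNat n.toNat])
    ((PySem.List.pyRange 97 103 1).foldl (fun acc n => acc ++ [Char.ofNat n.toNat]) [' '])

def aes128_validation_cypher_py (message : String) : Option String :=
  if PySem.Str.len (PySem.Str.replace message " " "") % 2 ≠ 0 then
    some "Mesajul este de lungime invalidă."
  else
    pvLoopA message.toList pvValidChars
      (PySem.List.pyRange 0 (PySem.Str.len message : Int) 1)

-- ===== PORT B =====
-- the regex character class [^0-9a-f ]: pvHexClass c is true iff c is NOT matched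
def pvHexClass (c : Char) : Bool := ('0' ≤ c && c ≤ '9') || ('a' ≤ c && c ≤ 'f') || c == ' '

def aes128_validation_cypher_py_alt (message : String) : Option String :=
  if PySem.Str.len (PySem.Str.replace message " " "") % 2 ≠ 0 then
    some "Mesajul este de lungime invalidă."
  else
    -- re.search(r'[^0-9a-f ]', message): leftmost match = first char failing pvHexClass
    match message.toList.find? (fun c => !pvHexClass c) with
    | some c => some ("Mesajul tău conține caractere invalide: " ++ String.ofList [c] ++ ".")
    | none => none

-- ===== PRECONDITION & SPEC =====
def Spec_aes128_validation_cypher_py (message : String) (out : Option String) : Prop := out = aes128_validation_cypher_py_alt message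
instance (message : String) (out : Option String) : Decidable (Spec_aes128_validation_cypher_py message out) := by unfold Spec_aes128_validation_cypher_py; infer_instance

-- ===== CLAIM (what is proved, stated in full; the proofs are below) =====
def Claim_equal_aes128_validation_cypher_py : Prop := ∀ (message : String), Dom_aes128_validation_cypher_py message → Spec_aes128_validation_cypher_py message (aes128_validation_cypher_py message)

-- ===== LEMMAS AND PROOFS =====
lemma pvChar_eq_iff (a b : Char) : a = b ↔ a.toNat = b.toNat := by
  constructor
  · intro h; rw [h]
  · intro h; exact Char.ext (UInt32.toNat_inj.mp h)

lemma pvChar_le_iff (a b : Char) : a ≤ b ↔ a.toNat ≤ b.toNat := by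
  rw [Char.le_def, UInt32.le_iff_toNat_le]; rfl

lemma pvValidChars_eval : pvValidChars =
    [' ','a','b','c','d','e','f','0','1','2','3','4','5','6','7','8','9'] := by decide

lemma pvMem_valid_iff (c : Char) : c ∈ pvValidChars ↔ pvHexClass c = true := by
  rw [pvValidChars_eval]
  simp only [pvHexClass, Bool.or_eq_true, Bool.and_eq_true, decide_eq_true_eq, beq_iff_eq,
    List.mem_cons, List.not_mem_nil, or_false, pvChar_eq_iff, pvChar_le_iff,
    show (' ').toNat = 32 from rfl, show ('a').toNat = 97 from rfl, show ('b').toNat = 98 from rfl,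
    show ('c').toNat = 99 from rfl, show ('d').toNat = 100 from rfl, show ('e').toNat = 101 from rfl,
    show ('f').toNat = 102 from rfl, show ('0').toNat = 48 from rfl, show ('1').toNat = 49 from rfl,
    show ('2').toNat = 50 from rfl, show ('3').toNat = 51 from rfl, show ('4').toNat = 52 from rfl,
    show ('5').toNat = 53 from rfl, show ('6').toNat = 54 from rfl, show ('7').toNat = 55 from rfl,
    show ('8').toNat = 56 from rfl, show ('9').toNat = 57 from rfl]
  omega

lemma pvLoopA_eq (cs : List Char) (n k : Nat) (h : cs.length - k = n) :
    pvLoopA cs pvValidChars (PySem.List.pyRange (k : Int) (cs.length : Int) 1) =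
      ((cs.drop k).find? (fun c => !pvHexClass c)).map pvInvalidMsg := by
  induction n generalizing k with
  | zero =>
    have hk : cs.length ≤ k := by omega
    rw [PySem.List.pyRange_one_eq_nil (by exact_mod_cast hk), List.drop_of_length_le hk]
    rfl
  | succ n ih =>
    have hk : k < cs.length := by omega
    rw [PySem.List.pyRange_one_cons (by exact_mod_cast hk)]
    have hget : PySem.List.pyGet? cs (k : Int) = some cs[k] := by
      simp [PySem.List.pyGet?_natCast, List.getElem?_eq_getElem hk]
    rw [List.drop_eq_getElem_cons hk]
    simp only [pvLoopA, hget, List.find?_cons]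
    by_cases hc : pvHexClass cs[k] = true
    · have hmem : cs[k] ∈ pvValidChars := (pvMem_valid_iff _).mpr hc
      simp only [hmem, not_true_eq_false, if_false, hc, Bool.not_true]
      have : ((k : Int) + 1) = ((k + 1 : Nat) : Int) := by push_cast; ring
      rw [this]
      exact ih (k + 1) (by omega)
    · have hmem : cs[k] ∉ pvValidChars := fun hm => hc ((pvMem_valid_iff _).mp hm)
      simp [hmem, hc, pvInvalidMsg]

-- ===== VERDICT (by name: the statement is the Claim_ definition above) =====
theorem aes128_validation_cypher_py_spec : Claim_equal_aes128_validation_cypher_py := by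
  intro message _
  unfold Spec_aes128_validation_cypher_py aes128_validation_cypher_py aes128_validation_cypher_py_alt
  split_ifs with h
  · rfl
  · have hlen : PySem.Str.len message = message.toList.length := PySem.Str.len_eq message
    rw [hlen]
    have := pvLoopA_eq message.toList message.toList.length 0 (by omega)
    simp only [Nat.cast_zero, List.drop_zero] at this
    rw [this]
    cases message.toList.find? (fun c => !pvHexClass c) <;> rfl
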